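-- pv_equiv track=rewrite | github.com/DannyLeee/News-Summary-using-BERTSUM | Preprocess.py | content_preprocess
-- ===== SOURCE A (Python) =====
-- def content_preprocess(content, ans):
--     content = content.replace(" ", "")
--     content_list = content.splitlines()
--     origin_content = content_list[:] # create a shallow copy, if don't add [:] will get the pointer
--     result_label = []
--     segments_ids = []
--     cls_ids = []
--     tgt_text_list = []
--     pos = 0
--     for i, text in enumerate(content_list):
--         if (pos < 512):
--             cls_ids.append(pos)
--             pos += len(text) + 2 # +2 for [CLS], [SEP]
--             if (ans.find(text) != -1):
--                 result_label.append(1) # label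
--                 tgt_text_list.append(text)
--             else:
--                 result_label.append(0) # label
--         content_list[i] = "[CLS] " + text + " [SEP]"
--     result_content = ' '.join(content_list)
--     tgt_text = '<p>'.join(tgt_text_list)
--     return result_content, result_label, cls_ids, origin_content, tgt_text
-- ===== SOURCE B (Python) =====
-- def content_preprocess(content, ans):
--     lines = content.replace(" ", "").splitlines()
--     # starting offsets via prefix sums: starts[i] is where line i's [CLS] would land
--     starts = [0]
--     for t in lines:
--         starts.append(starts[-1] + len(t) + 2)
--     # offsets are non-decreasing, so the lines under 512 form a prefix of length k
--     k = sum(1 for s in starts[:len(lines)] if s < 512)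
--     head = lines[:k]
--     result_content = ' '.join('[CLS] ' + t + ' [SEP]' for t in lines)
--     result_label = [1 if t in ans else 0 for t in head]
--     cls_ids = starts[:k]
--     tgt_text = '<p>'.join(t for t in head if t in ans)
--     return result_content, result_label, cls_ids, lines[:], tgt_text
-- ===== Notes on version B (the rewrite author's own statement) =====
-- stated objective: alternative
-- what changed: Replaces A's single stateful loop (running pos, conditional appends to four accumulators) by a prefix-sum pass over line lengths, a count of offsets below 512 giving the processed prefix length k, and then slices/map/filter of that prefix; correctness rests on the offsets being non-decreasing so the processed lines form exactly the first k.
import Mathlib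
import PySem

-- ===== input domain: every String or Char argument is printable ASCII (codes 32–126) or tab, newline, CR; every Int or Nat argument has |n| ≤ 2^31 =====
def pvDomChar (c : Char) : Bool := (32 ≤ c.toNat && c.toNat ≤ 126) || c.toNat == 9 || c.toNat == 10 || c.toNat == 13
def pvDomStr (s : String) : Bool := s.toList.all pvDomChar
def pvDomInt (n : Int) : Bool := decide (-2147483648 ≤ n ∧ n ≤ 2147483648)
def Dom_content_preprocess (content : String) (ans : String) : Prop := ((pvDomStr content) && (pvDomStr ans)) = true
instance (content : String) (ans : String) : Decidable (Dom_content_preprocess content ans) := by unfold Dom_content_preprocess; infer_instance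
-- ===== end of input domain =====

-- B replaces A's fused stateful loop by a prefix-sum pass over line lengths plus a count
-- and slices/maps/filters over the resulting prefix (objective: alternative decomposition).
-- Return-value equivalence only: A mutates content_list in place, B does not.


-- ===== PORT A =====
-- A's loop, one foldl step per line; the in-place assignment content_list[i] = "[CLS] " + text + " [SEP]"
-- is rendered as building the rewritten list left to right in the fold state.
def content_preprocess (content : String) (ans : String) : String × List Int × List Int × List String × String :=
  let content := PySem.Str.replace content " " ""
  let content_list := PySem.Str.splitlines content
  let origin_content := content_list
  let st := content_list.foldl
    (fun (st : List String × List Int × List Int × List String × Int) text =>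
      let (new_list, result_label, cls_ids, tgt_text_list, pos) := st
      if pos < 512 then
        let cls_ids := cls_ids ++ [pos]
        let pos := pos + PySem.Str.len text + 2
        if PySem.Str.find ans text ≠ -1 then
          (new_list ++ ["[CLS] " ++ text ++ " [SEP]"], result_label ++ [(1:Int)], cls_ids, tgt_text_list ++ [text], pos)
        else
          (new_list ++ ["[CLS] " ++ text ++ " [SEP]"], result_label ++ [(0:Int)], cls_ids, tgt_text_list, pos)
      else
        (new_list ++ ["[CLS] " ++ text ++ " [SEP]"], result_label, cls_ids, tgt_text_list, pos))
    ([], [], [], [], 0)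
  let result_content := PySem.Str.join " " st.1
  let tgt_text := PySem.Str.join "<p>" st.2.2.2.1
  (result_content, st.2.1, st.2.2.1, origin_content, tgt_text)

-- ===== PORT B =====
-- B: prefix-sum loop over line lengths (starts[-1] is pyGet? starts (-1)), then a count,
-- then slices / map / filter of the prefix of length k.
def content_preprocess_alt (content : String) (ans : String) : String × List Int × List Int × List String × String :=
  let lines := PySem.Str.splitlines (PySem.Str.replace content " " "")
  let starts := lines.foldl
    (fun (starts : List Int) t => starts ++ [(PySem.List.pyGet? starts (-1)).getD 0 + PySem.Str.len t + 2])
    [(0:Int)]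
  let k := (starts.take lines.length).countP (fun s => s < 512)
  let head := lines.take k
  let result_content := PySem.Str.join " " (lines.map (fun t => "[CLS] " ++ t ++ " [SEP]"))
  let result_label := head.map (fun t => if PySem.Str.isIn t ans then (1:Int) else 0)
  let cls_ids := starts.take k
  let tgt_text := PySem.Str.join "<p>" (head.filter (fun t => PySem.Str.isIn t ans))
  (result_content, result_label, cls_ids, lines, tgt_text)

-- ===== PRECONDITION & SPEC =====
def Spec_content_preprocess (content : String) (ans : String) (out : String × List Int × List Int × List String × String) : Prop := out = content_preprocess_alt content ans
instance (content : String) (ans : String) (out : String × List Int × List Int × List String × String) : Decidable (Spec_content_preprocess content ans out) := by unfold Spec_content_preprocess; infer_instance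

-- ===== CLAIM (what is proved, stated in full; the proofs are below) =====
def Claim_equal_content_preprocess : Prop := ∀ (content : String) (ans : String), Dom_content_preprocess content ans → Spec_content_preprocess content ans (content_preprocess content ans)

-- ===== LEMMAS AND PROOFS =====

-- abbreviation for A's fold step (proof-side only)
def cpStepA (ans : String) (st : List String × List Int × List Int × List String × Int) (text : String) :
    List String × List Int × List Int × List String × Int :=
  let (new_list, result_label, cls_ids, tgt_text_list, pos) := st
  if pos < 512 then
    let cls_ids := cls_ids ++ [pos]
    let pos := pos + PySem.Str.len text + 2
    if PySem.Str.find ans text ≠ -1 then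
      (new_list ++ ["[CLS] " ++ text ++ " [SEP]"], result_label ++ [(1:Int)], cls_ids, tgt_text_list ++ [text], pos)
    else
      (new_list ++ ["[CLS] " ++ text ++ " [SEP]"], result_label ++ [(0:Int)], cls_ids, tgt_text_list, pos)
  else
    (new_list ++ ["[CLS] " ++ text ++ " [SEP]"], result_label, cls_ids, tgt_text_list, pos)

-- start offsets of the lines after the first, from offset p
def scTail (p : Int) : List String → List Int
  | [] => []
  | t :: r => (p + PySem.Str.len t + 2) :: scTail (p + PySem.Str.len t + 2) r

-- start offsets of all lines, from offset p
def scAll (p : Int) : List String → List Int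
  | [] => []
  | t :: r => p :: scAll (p + PySem.Str.len t + 2) r

-- B's prefix-sum fold computed in closed form
lemma bStarts_closed (lines : List String) : ∀ (pre : List Int) (p : Int),
    lines.foldl (fun starts t => starts ++ [(PySem.List.pyGet? starts (-1)).getD 0 + PySem.Str.len t + 2]) (pre ++ [p])
      = (pre ++ [p]) ++ scTail p lines := by
  induction lines with
  | nil => intro pre p; simp [scTail]
  | cons t r ih =>
    intro pre p
    simp only [List.foldl_cons, PySem.List.pyGet?_neg_one_append_singleton, Option.getD_some, scTail]
    rw [List.append_assoc pre [p] [p + PySem.Str.len t + 2]]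
    rw [show pre ++ ([p] ++ [p + PySem.Str.len t + 2]) = (pre ++ [p]) ++ [p + PySem.Str.len t + 2] by simp]
    rw [ih (pre ++ [p]) (p + PySem.Str.len t + 2)]
    simp

lemma scAll_eq_take (lines : List String) : ∀ p, (p :: scTail p lines).take lines.length = scAll p lines := by
  induction lines with
  | nil => intro p; simp [scAll]
  | cons t r ih =>
    intro p
    simp only [scTail, scAll, List.length_cons, List.take_succ_cons]
    exact congrArg _ (ih _)

lemma len_nonneg (t : String) : 0 ≤ PySem.Str.len t := by
  simp [PySem.Str.len_eq]

lemma scAll_count_zero (lines : List String) : ∀ p, 512 ≤ p →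
    (scAll p lines).countP (fun s => decide (s < 512)) = 0 := by
  induction lines with
  | nil => intro p _; simp [scAll]
  | cons t r ih =>
    intro p hp
    have h2 := len_nonneg t
    simp only [scAll, List.countP_cons, decide_eq_true_eq]
    rw [ih (p + PySem.Str.len t + 2) (by omega)]
    simp [not_lt.mpr hp]

-- once pos ≥ 512, A's fold only extends the rewritten list
lemma cpFoldA_saturated (ans : String) (lines : List String) (nl : List String)
    (labels cls : List Int) (tgt : List String) (pos : Int) (h : 512 ≤ pos) :
    lines.foldl (cpStepA ans) (nl, labels, cls, tgt, pos)
      = (nl ++ lines.map (fun t => "[CLS] " ++ t ++ " [SEP]"), labels, cls, tgt, pos) := by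
  induction lines generalizing nl with
  | nil => simp
  | cons text rest ih =>
    simp only [List.foldl_cons, List.map_cons]
    rw [show cpStepA ans (nl, labels, cls, tgt, pos) text
        = (nl ++ ["[CLS] " ++ text ++ " [SEP]"], labels, cls, tgt, pos) by
      simp [cpStepA, not_lt.mpr h]]
    rw [ih _]
    simp

-- A's fold in closed form: the processed lines are the prefix of length k (count of offsets < 512)
lemma cpFoldA_closed (ans : String) (lines : List String) : ∀ (p : Int) (nl : List String)
    (L C : List Int) (T : List String), ∃ q,
    lines.foldl (cpStepA ans) (nl, L, C, T, p)
      = (nl ++ lines.map (fun t => "[CLS] " ++ t ++ " [SEP]"),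
         L ++ (lines.take ((scAll p lines).countP (fun s => decide (s < 512)))).map
              (fun t => if PySem.Str.isIn t ans then (1:Int) else 0),
         C ++ (scAll p lines).take ((scAll p lines).countP (fun s => decide (s < 512))),
         T ++ (lines.take ((scAll p lines).countP (fun s => decide (s < 512)))).filter
              (fun t => PySem.Str.isIn t ans),
         q) := by
  induction lines with
  | nil => intro p nl L C T; exact ⟨p, by simp [scAll]⟩
  | cons t r ih =>
    intro p nl L C T
    by_cases hp : p < 512
    · have hmem : (PySem.Chars.find ans.toList t.toList ≠ -1) ↔ PySem.Chars.isIn t.toList ans.toList = true := by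
        rw [PySem.Chars.find_ne_neg_one_iff, PySem.Chars.isIn_iff_infix]
      simp only [scAll, List.countP_cons, decide_eq_true_eq, if_pos hp, List.foldl_cons,
        List.map_cons]
      by_cases hf : PySem.Chars.isIn t.toList ans.toList = true
      · have hfind : ¬ PySem.Chars.find ans.toList t.toList = -1 := hmem.mpr hf
        rw [show cpStepA ans (nl, L, C, T, p) t
            = (nl ++ ["[CLS] " ++ t ++ " [SEP]"], L ++ [(1:Int)], C ++ [p], T ++ [t],
               p + PySem.Str.len t + 2) by
          simp [cpStepA, hp, hfind]]
        obtain ⟨q, hq⟩ := ih (p + PySem.Str.len t + 2) (nl ++ ["[CLS] " ++ t ++ " [SEP]"])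
          (L ++ [(1:Int)]) (C ++ [p]) (T ++ [t])
        refine ⟨q, ?_⟩
        rw [hq]
        simp [List.take_succ_cons, hf]
      · have hfe : PySem.Chars.find ans.toList t.toList = -1 := by
          by_contra h
          exact hf (hmem.mp h)
        rw [show cpStepA ans (nl, L, C, T, p) t
            = (nl ++ ["[CLS] " ++ t ++ " [SEP]"], L ++ [(0:Int)], C ++ [p], T,
               p + PySem.Str.len t + 2) by
          simp [cpStepA, hp, hfe]]
        obtain ⟨q, hq⟩ := ih (p + PySem.Str.len t + 2) (nl ++ ["[CLS] " ++ t ++ " [SEP]"])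
          (L ++ [(0:Int)]) (C ++ [p]) T
        refine ⟨q, ?_⟩
        rw [hq]
        simp [List.take_succ_cons, hf]
    · refine ⟨p, ?_⟩
      rw [cpFoldA_saturated ans (t :: r) nl L C T p (not_lt.mp hp)]
      rw [scAll_count_zero (t :: r) p (not_lt.mp hp)]
      simp

-- ===== VERDICT (by name: the statement is the Claim_ definition above) =====
theorem content_preprocess_spec : Claim_equal_content_preprocess := by
  intro content ans _
  unfold Spec_content_preprocess content_preprocess content_preprocess_alt
  obtain ⟨q, hq⟩ := cpFoldA_closed ans (PySem.Str.splitlines (PySem.Str.replace content " " "")) 0 [] [] [] []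
  simp only []
  rw [show (fun (st : List String × List Int × List Int × List String × Int) text =>
      let (new_list, result_label, cls_ids, tgt_text_list, pos) := st
      if pos < 512 then
        let cls_ids := cls_ids ++ [pos]
        let pos := pos + PySem.Str.len text + 2
        if PySem.Str.find ans text ≠ -1 then
          (new_list ++ ["[CLS] " ++ text ++ " [SEP]"], result_label ++ [(1:Int)], cls_ids, tgt_text_list ++ [text], pos)
        else
          (new_list ++ ["[CLS] " ++ text ++ " [SEP]"], result_label ++ [(0:Int)], cls_ids, tgt_text_list, pos)
      else
        (new_list ++ ["[CLS] " ++ text ++ " [SEP]"], result_label, cls_ids, tgt_text_list, pos))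
      = cpStepA ans from rfl]
  rw [hq]
  have hb : (PySem.Str.splitlines (PySem.Str.replace content " " "")).foldl
      (fun (starts : List Int) t => starts ++ [(PySem.List.pyGet? starts (-1)).getD 0 + PySem.Str.len t + 2])
      [(0:Int)] = (0:Int) :: scTail 0 (PySem.Str.splitlines (PySem.Str.replace content " " "")) := by
    have := bStarts_closed (PySem.Str.splitlines (PySem.Str.replace content " " "")) [] 0
    simpa using this
  rw [hb, scAll_eq_take (PySem.Str.splitlines (PySem.Str.replace content " " "")) 0]
  have hkle : ∀ (ls : List String),
      (scAll 0 ls).countP (fun s => decide (s < 512)) ≤ ls.length := by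
    intro ls
    have h1 : (scAll 0 ls).countP (fun s => decide (s < 512)) ≤ (scAll 0 ls).length :=
      List.countP_le_length
    have h2 : ∀ (p : Int) (ms : List String), (scAll p ms).length = ms.length := by
      intro p ms
      induction ms generalizing p with
      | nil => simp [scAll]
      | cons a b ih => simp [scAll, ih]
    rw [h2] at h1
    exact h1
  have hcls : ∀ k : Nat, k ≤ (PySem.Str.splitlines (PySem.Str.replace content " " "")).length →
      ((0:Int) :: scTail 0 (PySem.Str.splitlines (PySem.Str.replace content " " ""))).take k
        = (scAll 0 (PySem.Str.splitlines (PySem.Str.replace content " " ""))).take k := by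
    intro k hk
    rw [← scAll_eq_take (PySem.Str.splitlines (PySem.Str.replace content " " "")) 0,
      List.take_take, min_eq_left hk]
  rw [hcls _ (hkle _)]
  simp
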